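-- pv_equiv track=rewrite | github.com/lwilbur/Gorf-reverse-engineering | GBA_Rename.py | buildHexAddr
-- ===== SOURCE A (Python) =====
-- def tohex(val, nbits):
--     """Converts val (a decimal integer) to an n-bit hex number.
--
--     Used in this script for 8-bit hex values.
--     Source: https://stackoverflow.com/questions/7822956/how-to-convert-negative-integer-value-to-hex-in-python
--     """
--     return hex((val + (1 << nbits)) % (1 << nbits))
--
-- def buildHexAddr(byteArray):
--     """Converts little-endian 4-element array of bytes into one hex string."""
--     byte1 = tohex(byteArray[3], 8)[2:] # cut off 0x from start of each byte
--     byte2 = tohex(byteArray[2], 8)[2:]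
--     byte3 = tohex(byteArray[1], 8)[2:]
--     byte4 = tohex(byteArray[0], 8)[2:]
--     hexBytes = [byte1, byte2, byte3, byte4]
--     hexAddr = ""
--     # Handle each byte in turn, building up the hexAddr
--     for b in hexBytes:
--         if len(b) == 1:  # force each byte to be 2 numbers wide
--             b = "0" + b
--         hexAddr += b
--     return "0x" + hexAddr
-- ===== SOURCE B (Python) =====
-- def buildHexAddr(byteArray):
--     """Converts little-endian 4-element array of bytes into one hex string."""
--     val = 0
--     for i in range(3, -1, -1):
--         val = val * 256 + byteArray[i] % 256
--     return '0x' + format(val, '08x')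
-- ===== Notes on version B (the rewrite author's own statement) =====
-- stated objective: idiomatic
-- what changed: Replaces the four per-byte hex-string conversions with pad-and-concatenate by folding the bytes into one integer accumulator (val = val*256 + b%256 over a countdown range) formatted once with format(val, '08x').
import Mathlib
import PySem

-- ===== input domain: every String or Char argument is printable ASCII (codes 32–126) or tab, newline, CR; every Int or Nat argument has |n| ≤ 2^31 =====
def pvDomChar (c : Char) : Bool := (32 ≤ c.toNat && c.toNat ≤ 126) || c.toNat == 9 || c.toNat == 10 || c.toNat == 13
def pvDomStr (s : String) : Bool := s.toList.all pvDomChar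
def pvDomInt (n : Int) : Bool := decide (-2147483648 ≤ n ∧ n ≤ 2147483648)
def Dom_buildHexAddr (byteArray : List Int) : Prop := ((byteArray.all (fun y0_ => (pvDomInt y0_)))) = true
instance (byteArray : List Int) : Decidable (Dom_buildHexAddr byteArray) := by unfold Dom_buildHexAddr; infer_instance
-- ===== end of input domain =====

-- B folds the four masked bytes into one integer accumulator and formats it once
-- with format(val, '08x'), replacing A's four per-byte hex conversions with
-- pad-and-concatenate; same output, same cost (objective: idiomatic).


-- Shared helper: the hex digits Python's hex()/format(…,'x') emit.
-- str(n) in base 16, lowercase: pvHexDigit n is the n-th hex digit character.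
def pvHexDigit (n : Nat) : Char :=
  List.getD ['0','1','2','3','4','5','6','7','8','9','a','b','c','d','e','f'] n '0'

-- Hex digit string (as List Char) of a nonnegative integer, most significant first.
def pvHexChars (n : Nat) : List Char :=
  if _h : n < 16 then [pvHexDigit n]
  else pvHexChars (n / 16) ++ [pvHexDigit (n % 16)]
  decreasing_by omega

-- ===== PORT A =====
-- Python's hex(v); strings are ported as List Char (exact on this ASCII output).
def pvHexA (v : Int) : List Char :=
  if v < 0 then '-' :: '0' :: 'x' :: pvHexChars (-v).toNat
  else '0' :: 'x' :: pvHexChars v.toNat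

-- tohex(val, nbits) = hex((val + (1 << nbits)) % (1 << nbits))
def pvTohexA (val : Int) (nbits : Int) : List Char :=
  pvHexA (PySem.Int.mod (val + ((1 : Int) <<< nbits.toNat)) ((1 : Int) <<< nbits.toNat))

def buildHexAddr (byteArray : List Int) : String :=
  -- byteArray[3] … byteArray[0]; Pre_ guarantees the indices are in range
  let byte1 := PySem.List.slice (pvTohexA (PySem.List.pyGetD byteArray 3 0) 8) (some 2) none
  let byte2 := PySem.List.slice (pvTohexA (PySem.List.pyGetD byteArray 2 0) 8) (some 2) none
  let byte3 := PySem.List.slice (pvTohexA (PySem.List.pyGetD byteArray 1 0) 8) (some 2) none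
  let byte4 := PySem.List.slice (pvTohexA (PySem.List.pyGetD byteArray 0 0) 8) (some 2) none
  let hexBytes := [byte1, byte2, byte3, byte4]
  let hexAddr := hexBytes.foldl (fun acc b => acc ++ (if b.length = 1 then '0' :: b else b)) []
  String.mk ('0' :: 'x' :: hexAddr)

-- ===== PORT B =====
-- format(val, '08x') for a nonnegative val (val is always ≥ 0 in B): hex digits zero-filled to 8.
def pvFormat08x (val : Int) : List Char :=
  PySem.Chars.zfill (pvHexChars val.toNat) 8

def buildHexAddr_alt (byteArray : List Int) : String :=
  let val := (PySem.List.pyRange 3 (-1) (-1)).foldl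
    (fun v i => v * 256 + PySem.Int.mod (PySem.List.pyGetD byteArray i 0) 256) 0
  String.mk ('0' :: 'x' :: pvFormat08x val)

-- ===== PRECONDITION & SPEC =====
-- A indexes byteArray[3] (and [2],[1],[0]): on lists shorter than 4 it raises IndexError.
def Pre_buildHexAddr (byteArray : List Int) : Prop := 4 ≤ byteArray.length
instance (byteArray : List Int) : Decidable (Pre_buildHexAddr byteArray) := by unfold Pre_buildHexAddr; infer_instance
def pvWitness_buildHexAddr : List Int := [1, 2, 3, 4]

def Spec_buildHexAddr (byteArray : List Int) (out : String) : Prop := out = buildHexAddr_alt byteArray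
instance (byteArray : List Int) (out : String) : Decidable (Spec_buildHexAddr byteArray out) := by unfold Spec_buildHexAddr; infer_instance

-- ===== CLAIM (what is proved, stated in full; the proofs are below) =====
def Claim_equal_buildHexAddr : Prop := ∀ (byteArray : List Int), Dom_buildHexAddr byteArray → Pre_buildHexAddr byteArray → Spec_buildHexAddr byteArray (buildHexAddr byteArray)

-- ===== LEMMAS AND PROOFS =====

-- Fixed-width k-digit hex rendering (proof-only device).
def pvHexPad (n k : Nat) : List Char :=
  match k with
  | 0 => []
  | k + 1 => pvHexPad (n / 16) k ++ [pvHexDigit (n % 16)]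

lemma pvHexDigit_mem (n : Nat) :
    pvHexDigit n ∈ ['0','1','2','3','4','5','6','7','8','9','a','b','c','d','e','f'] := by
  by_cases h : n < 16
  · interval_cases n <;> decide
  · have h0 : pvHexDigit n = '0' := by
      unfold pvHexDigit
      rw [List.getD_eq_getElem?_getD, List.getElem?_eq_none (by simp; omega)]
      rfl
    rw [h0]; decide

lemma pvHexChars_mem {c : Char} {n : Nat} (h : c ∈ pvHexChars n) :
    c ∈ ['0','1','2','3','4','5','6','7','8','9','a','b','c','d','e','f'] := by
  induction n using Nat.strong_induction_on with
  | _ n ih =>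
    unfold pvHexChars at h
    split at h
    · rw [List.mem_singleton] at h; rw [h]; exact pvHexDigit_mem n
    · rcases List.mem_append.mp h with h' | h'
      · exact ih (n / 16) (by omega) h'
      · rw [List.mem_singleton] at h'; rw [h']; exact pvHexDigit_mem (n % 16)

lemma pvHexChars_ne_nil (n : Nat) : pvHexChars n ≠ [] := by
  unfold pvHexChars; split <;> simp

-- zfill on a sign-free nonempty string is just left-padding with zeros.
lemma zfill_hexChars (n k : Nat) :
    PySem.Chars.zfill (pvHexChars n) (k : Int) =
      List.replicate (k - (pvHexChars n).length) '0' ++ pvHexChars n := by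
  rcases hcs : pvHexChars n with _ | ⟨c, rest⟩
  · exact absurd hcs (pvHexChars_ne_nil n)
  have hc : c ∈ pvHexChars n := by rw [hcs]; exact List.mem_cons_self
  have hsign : ¬ (c = '+' ∨ c = '-') := by
    have := pvHexChars_mem hc
    fin_cases this <;> simp
  rw [PySem.Chars.zfill]
  split
  · rename_i hle
    have hz : k - (c :: rest).length = 0 := by
      have hle' : (k : Int) ≤ ((c :: rest).length : Int) := by exact_mod_cast hle
      omega
    rw [hz]
    simp
  · simp

lemma pvHexPad_zero (k : Nat) : pvHexPad 0 k = List.replicate k '0' := by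
  induction k with
  | zero => rfl
  | succ k ih => simp [pvHexPad, ih, List.replicate_succ']; rfl

lemma length_pvHexChars_pos (n : Nat) : 0 < (pvHexChars n).length := by
  have := pvHexChars_ne_nil n
  cases h : pvHexChars n with
  | nil => exact absurd h this
  | cons c cs => simp

-- The padded-hex characterisation: for n < 16^k (k > 0), the k-digit rendering
-- is the plain hex digits left-padded with zeros to width k.
lemma pvHexPad_eq (k : Nat) (hk : 0 < k) :
    ∀ n : Nat, n < 16 ^ k →
      pvHexPad n k = List.replicate (k - (pvHexChars n).length) '0' ++ pvHexChars n := by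
  induction k with
  | zero => omega
  | succ k ih =>
    intro n hn
    by_cases h16 : n < 16
    · have hchars : pvHexChars n = [pvHexDigit n] := by rw [pvHexChars]; simp [h16]
      have hdiv : n / 16 = 0 := by omega
      have hmod : n % 16 = n := by omega
      rw [pvHexPad, hdiv, hmod, pvHexPad_zero, hchars]
      simp
    · have hkpos : 0 < k := by
        rcases Nat.eq_zero_or_pos k with rfl | h
        · simp at hn; omega
        · exact h
      have hdiv : n / 16 < 16 ^ k := by
        rw [Nat.div_lt_iff_lt_mul (by norm_num)]
        calc n < 16 ^ (k + 1) := hn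
        _ = 16 ^ k * 16 := by ring
      have hchars : pvHexChars n = pvHexChars (n / 16) ++ [pvHexDigit (n % 16)] := by
        rw [pvHexChars]; simp [h16]
      rw [pvHexPad, ih hkpos (n / 16) hdiv, hchars]
      have hlen := length_pvHexChars_pos (n / 16)
      simp only [List.length_append, List.length_singleton, List.append_assoc]
      congr 2
      omega

-- Splitting two hex digits off the low end of a fixed-width rendering.
lemma pvHexPad_split (a m k : Nat) (hm : m < 256) :
    pvHexPad (a * 256 + m) (k + 2) = pvHexPad a k ++ pvHexPad m 2 := by
  have h1 : (a * 256 + m) % 16 = m % 16 := by omega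
  have h2 : (a * 256 + m) / 16 = a * 16 + m / 16 := by omega
  have h3 : (a * 16 + m / 16) % 16 = m / 16 := by omega
  have h4 : (a * 16 + m / 16) / 16 = a := by omega
  have h5 : m / 16 % 16 = m / 16 := by omega
  have h6 : m / 16 / 16 = 0 := by omega
  simp [pvHexPad, h1, h2, h3, h4, h5]

-- A's pad-to-two-digits step equals the fixed-width-2 rendering, for a byte value.
lemma pad2_eq (m : Nat) (hm : m < 256) :
    (if (pvHexChars m).length = 1 then '0' :: pvHexChars m else pvHexChars m) = pvHexPad m 2 := by
  by_cases h16 : m < 16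
  · have hchars : pvHexChars m = [pvHexDigit m] := by rw [pvHexChars]; simp [h16]
    have hdiv : m / 16 = 0 := by omega
    have hmod : m % 16 = m := by omega
    simp [hchars, pvHexPad, hdiv, hmod, pvHexDigit]
  · have hin : m / 16 < 16 := by omega
    have hchars : pvHexChars m = pvHexChars (m / 16) ++ [pvHexDigit (m % 16)] := by
      rw [pvHexChars]; simp [h16]
    have hinner : pvHexChars (m / 16) = [pvHexDigit (m / 16)] := by
      rw [pvHexChars]; simp [hin]
    have h5 : m / 16 % 16 = m / 16 := by omega
    have h6 : m / 16 / 16 = 0 := by omega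
    simp [hchars, hinner, pvHexPad, h5]

-- tohex's pre-shifted mod equals the plain Python mod of the byte.
lemma mod_shift (b : Int) : PySem.Int.mod (b + 256) 256 = PySem.Int.mod b 256 := by
  rw [PySem.Int.mod_eq_emod_of_pos (by norm_num), PySem.Int.mod_eq_emod_of_pos (by norm_num)]
  omega

-- A's per-byte string (after slicing off "0x") is the hex digits of b % 256.
lemma byteChars_eq (b : Int) :
    PySem.List.slice (pvTohexA b 8) (some 2) none = pvHexChars (PySem.Int.mod b 256).toNat := by
  have hnn : 0 ≤ PySem.Int.mod b 256 := PySem.Int.mod_nonneg b (by norm_num)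
  have hshift : ((1 : Int) <<< (8 : Int).toNat) = 256 := by decide
  rw [pvTohexA, hshift, mod_shift, pvHexA, if_neg (by omega),
    PySem.List.slice_from _ (by norm_num)]
  rfl

theorem buildHexAddr_spec_aux (byteArray : List Int) (hpre : 4 ≤ byteArray.length) :
    buildHexAddr byteArray = buildHexAddr_alt byteArray := by
  obtain ⟨b0, b1, b2, b3, rest, rfl⟩ :
      ∃ b0 b1 b2 b3 rest, byteArray = b0 :: b1 :: b2 :: b3 :: rest := by
    match byteArray, hpre with
    | b0 :: b1 :: b2 :: b3 :: rest, _ => exact ⟨b0, b1, b2, b3, rest, rfl⟩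
  set m0 := PySem.Int.mod b0 256 with hm0
  set m1 := PySem.Int.mod b1 256 with hm1
  set m2 := PySem.Int.mod b2 256 with hm2
  set m3 := PySem.Int.mod b3 256 with hm3
  have hget3 : PySem.List.pyGetD (b0 :: b1 :: b2 :: b3 :: rest) 3 0 = b3 := by
    simp only [pysem, PySem.List.pyGetD, PySem.List.pyGet?, PySem.List.pyIdx?]
    split
    · split
      · simp
      · omega
    · omega
  have hget2 : PySem.List.pyGetD (b0 :: b1 :: b2 :: b3 :: rest) 2 0 = b2 := by
    simp only [pysem, PySem.List.pyGetD, PySem.List.pyGet?, PySem.List.pyIdx?]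
    split
    · split
      · simp
      · omega
    · omega
  have hget1 : PySem.List.pyGetD (b0 :: b1 :: b2 :: b3 :: rest) 1 0 = b1 := by
    simp only [pysem, PySem.List.pyGetD, PySem.List.pyGet?, PySem.List.pyIdx?]
    split
    · split
      · simp
      · omega
    · omega
  have hget0 : PySem.List.pyGetD (b0 :: b1 :: b2 :: b3 :: rest) 0 0 = b0 := by
    simp only [pysem, PySem.List.pyGetD, PySem.List.pyGet?, PySem.List.pyIdx?]
    split
    · split
      · simp
      · omega
    · omega
  -- byte bounds
  have hb : ∀ b : Int, 0 ≤ PySem.Int.mod b 256 ∧ PySem.Int.mod b 256 < 256 := fun b =>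
    ⟨PySem.Int.mod_nonneg b (by norm_num), PySem.Int.mod_lt b (by norm_num)⟩
  obtain ⟨h0l, h0u⟩ := hb b0; obtain ⟨h1l, h1u⟩ := hb b1
  obtain ⟨h2l, h2u⟩ := hb b2; obtain ⟨h3l, h3u⟩ := hb b3
  set n0 := m0.toNat with hn0; set n1 := m1.toNat with hn1
  set n2 := m2.toNat with hn2; set n3 := m3.toNat with hn3
  have hn0u : n0 < 256 := by omega
  have hn1u : n1 < 256 := by omega
  have hn2u : n2 < 256 := by omega
  have hn3u : n3 < 256 := by omega
  -- A side
  have hA : buildHexAddr (b0 :: b1 :: b2 :: b3 :: rest) =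
      String.mk ('0' :: 'x' ::
        (pvHexPad n3 2 ++ pvHexPad n2 2 ++ pvHexPad n1 2 ++ pvHexPad n0 2)) := by
    rw [buildHexAddr]
    simp only [hget3, hget2, hget1, hget0, byteChars_eq, ← hm0, ← hm1, ← hm2, ← hm3,
      ← hn0, ← hn1, ← hn2, ← hn3, List.foldl]
    rw [pad2_eq n3 hn3u, pad2_eq n2 hn2u, pad2_eq n1 hn1u, pad2_eq n0 hn0u]
    simp
  -- B side
  have hrange : PySem.List.pyRange 3 (-1) (-1) = [3, 2, 1, 0] := by decide
  have hval : ((PySem.List.pyRange 3 (-1) (-1)).foldl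
      (fun v i => v * 256 + PySem.Int.mod (PySem.List.pyGetD (b0 :: b1 :: b2 :: b3 :: rest) i 0) 256) 0)
      = ((m3 * 256 + m2) * 256 + m1) * 256 + m0 := by
    rw [hrange]
    simp [List.foldl, hget3, hget2, hget1, hget0, hm0, hm1, hm2, hm3]
  have hNat : (((m3 * 256 + m2) * 256 + m1) * 256 + m0).toNat
      = ((n3 * 256 + n2) * 256 + n1) * 256 + n0 := by omega
  have hlt : ((n3 * 256 + n2) * 256 + n1) * 256 + n0 < 16 ^ 8 := by
    have : (16 : Nat) ^ 8 = 4294967296 := by norm_num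
    omega
  have hB : buildHexAddr_alt (b0 :: b1 :: b2 :: b3 :: rest) =
      String.mk ('0' :: 'x' ::
        (pvHexPad n3 2 ++ pvHexPad n2 2 ++ pvHexPad n1 2 ++ pvHexPad n0 2)) := by
    rw [buildHexAddr_alt]
    simp only [hval, pvFormat08x, hNat]
    rw [show ((8 : Int) = ((8 : Nat) : Int)) by norm_num, zfill_hexChars,
      ← pvHexPad_eq 8 (by norm_num) _ hlt]
    rw [pvHexPad_split _ _ 6 hn0u]
    rw [pvHexPad_split _ _ 4 hn1u]
    rw [pvHexPad_split _ _ 2 hn2u]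
  rw [hA, hB]

-- ===== VERDICT (by name: the statement is the Claim_ definition above) =====
theorem buildHexAddr_spec : Claim_equal_buildHexAddr := by
  intro byteArray _ hpre
  exact buildHexAddr_spec_aux byteArray hpre
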